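-- pv_equiv track=rewrite | github.com/tommyfevvs-sudo/cognitive-ability-items | vs/figures/figures_222_333_444.py | is_connected_vertex
-- ===== SOURCE A (Python) =====
-- def is_connected_vertex(coords):
--     if not coords: return True
--     visited, stack = set(), [coords[0]]
--     while stack:
--         curr = stack.pop()
--         if curr not in visited:
--             visited.add(curr)
--             for dx in [-1, 0, 1]:
--                 for dy in [-1, 0, 1]:
--                     for dz in [-1, 0, 1]:
--                         if dx == 0 and dy == 0 and dz == 0: continue
--                         nb = (curr[0]+dx, curr[1]+dy, curr[2]+dz)
--                         if nb in coords and nb not in visited: stack.append(nb)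
--     return len(visited) == len(coords)
-- ===== SOURCE B (Python) =====
-- def is_connected_vertex(coords):
--     # Level-order frontier BFS over a hash set of the cells, marking cells
--     # as visited when they are enqueued, so no cell enters a queue twice.
--     if not coords:
--         return True
--     cells = set(coords)
--     visited = {coords[0]}
--     frontier = [coords[0]]
--     while frontier:
--         nxt = []
--         for cur in frontier:
--             x, y, z = cur[0], cur[1], cur[2]
--             for dx in (-1, 0, 1):
--                 for dy in (-1, 0, 1):
--                     for dz in (-1, 0, 1):
--                         if dx == 0 and dy == 0 and dz == 0:
--                             continue
--                         nb = (x + dx, y + dy, z + dz)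
--                         if nb in cells and nb not in visited:
--                             visited.add(nb)
--                             nxt.append(nb)
--         frontier = nxt
--     return len(visited) == len(coords)
-- ===== Notes on version B (the rewrite author's own statement) =====
-- stated objective: alternative
-- what changed: Replaces A's stack DFS with mark-on-pop and list-scan membership by a level-order frontier BFS over a precomputed hash set of cells with mark-on-push, so no cell is ever enqueued twice.
import Mathlib
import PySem

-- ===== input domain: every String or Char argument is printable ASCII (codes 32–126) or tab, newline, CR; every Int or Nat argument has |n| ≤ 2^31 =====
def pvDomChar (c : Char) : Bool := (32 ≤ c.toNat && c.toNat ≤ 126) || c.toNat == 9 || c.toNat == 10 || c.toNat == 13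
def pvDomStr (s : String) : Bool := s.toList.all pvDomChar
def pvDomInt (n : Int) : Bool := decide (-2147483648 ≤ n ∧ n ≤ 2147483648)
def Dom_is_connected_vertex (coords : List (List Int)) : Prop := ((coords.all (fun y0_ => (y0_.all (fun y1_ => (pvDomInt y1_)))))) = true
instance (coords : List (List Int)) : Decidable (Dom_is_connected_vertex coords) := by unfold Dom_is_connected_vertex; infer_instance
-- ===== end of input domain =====

-- B replaces A's stack DFS (mark-on-pop, list-scan membership) by a level-order
-- frontier BFS over a precomputed set of cells with mark-on-push; proved to return
-- the same Bool on all inputs where A returns (Pre_ excludes the IndexError inputs).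


-- ===== PORT A =====
def pvA_deltas : List Int := [-1, 0, 1]

-- the triple 'for dx/dy/dz' loop of A, appending candidate neighbours to the stack
-- (stack top = list head; Python appends to and pops from the list's end)
def pvA_visit (coords : List (List Int)) (visited : PySem.Set (List Int))
    (stack : List (List Int)) (curr : List Int) : List (List Int) :=
  pvA_deltas.foldl (fun st1 dx =>
    pvA_deltas.foldl (fun st2 dy =>
      pvA_deltas.foldl (fun st3 dz =>
        if dx = 0 ∧ dy = 0 ∧ dz = 0 then st3
        else
          let nb := [PySem.List.pyGetD curr 0 0 + dx,
                     PySem.List.pyGetD curr 1 0 + dy,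
                     PySem.List.pyGetD curr 2 0 + dz]
          if nb ∈ coords ∧ nb ∉ visited then nb :: st3 else st3) st2) st1) stack

-- A's while loop (fuel only makes the recursion structural; it is proved sufficient)
def pvA_loop (coords : List (List Int)) :
    Nat → PySem.Set (List Int) → List (List Int) → PySem.Set (List Int)
  | 0, visited, _ => visited
  | fuel+1, visited, stack =>
    match stack with
    | [] => visited
    | curr :: rest =>
      if curr ∈ visited then pvA_loop coords fuel visited rest
      else
        let visited' := PySem.Set.add visited curr
        pvA_loop coords fuel visited' (pvA_visit coords visited' rest curr)

def is_connected_vertex (coords : List (List Int)) : Bool :=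
  match coords with
  | [] => true
  | c0 :: _ =>
    let visited := pvA_loop coords (27 * (coords.length + 1) + 1) PySem.Set.empty [c0]
    visited.length == coords.length

-- ===== PORT B =====
def pvB_deltas : List Int := [-1, 0, 1]

-- B's inner triple loop: extend (visited, nxt) by the fresh in-set neighbours of cur
def pvB_expand (cells : PySem.Set (List Int))
    (acc : PySem.Set (List Int) × List (List Int)) (cur : List Int) :
    PySem.Set (List Int) × List (List Int) :=
  let x := PySem.List.pyGetD cur 0 0
  let y := PySem.List.pyGetD cur 1 0
  let z := PySem.List.pyGetD cur 2 0
  pvB_deltas.foldl (fun a1 dx =>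
    pvB_deltas.foldl (fun a2 dy =>
      pvB_deltas.foldl (fun a3 dz =>
        if dx = 0 ∧ dy = 0 ∧ dz = 0 then a3
        else
          let nb := [x + dx, y + dy, z + dz]
          if nb ∈ cells ∧ nb ∉ a3.1 then (PySem.Set.add a3.1 nb, a3.2 ++ [nb])
          else a3) a2) a1) acc

-- B's while loop over frontiers (fuel only makes the recursion structural)
def pvB_loop (cells : PySem.Set (List Int)) :
    Nat → PySem.Set (List Int) → List (List Int) → PySem.Set (List Int)
  | 0, visited, _ => visited
  | fuel+1, visited, frontier =>
    match frontier with
    | [] => visited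
    | _ :: _ =>
      let res := frontier.foldl (pvB_expand cells) (visited, [])
      pvB_loop cells fuel res.1 res.2

def is_connected_vertex_alt (coords : List (List Int)) : Bool :=
  match coords with
  | [] => true
  | c0 :: _ =>
    let cells := PySem.Set.ofList coords
    let visited := pvB_loop cells (coords.length + 2) (PySem.Set.add PySem.Set.empty c0) [c0]
    visited.length == coords.length

-- ===== PRECONDITION & SPEC =====
-- Pre_ excludes exactly the inputs on which Python A raises IndexError: a nonempty
-- coords whose first cell has fewer than 3 components (B raises there as well).
def Pre_is_connected_vertex (coords : List (List Int)) : Prop :=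
  coords = [] ∨ 3 ≤ (coords.headD []).length
instance (coords : List (List Int)) : Decidable (Pre_is_connected_vertex coords) := by
  unfold Pre_is_connected_vertex; infer_instance

def pvWitness_is_connected_vertex : List (List Int) := [[0, 0, 0], [1, 1, 1]]

def Spec_is_connected_vertex (coords : List (List Int)) (out : Bool) : Prop :=
  out = is_connected_vertex_alt coords
instance (coords : List (List Int)) (out : Bool) : Decidable (Spec_is_connected_vertex coords out) := by
  unfold Spec_is_connected_vertex; infer_instance

-- ===== CLAIM (what is proved, stated in full; the proofs are below) =====
def Claim_equal_is_connected_vertex : Prop := ∀ (coords : List (List Int)), Dom_is_connected_vertex coords → Pre_is_connected_vertex coords → Spec_is_connected_vertex coords (is_connected_vertex coords)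

-- ===== LEMMAS AND PROOFS =====

-- the 26 neighbour cells of curr, as one flat list (proof-side view of both triple loops)
def pvNbrs (curr : List Int) : List (List Int) :=
  pvA_deltas.flatMap (fun dx =>
    pvA_deltas.flatMap (fun dy =>
      pvA_deltas.filterMap (fun dz =>
        if dx = 0 ∧ dy = 0 ∧ dz = 0 then none
        else some [PySem.List.pyGetD curr 0 0 + dx,
                   PySem.List.pyGetD curr 1 0 + dy,
                   PySem.List.pyGetD curr 2 0 + dz])))

-- reachability from c0 through cells of coords via 26-neighbourhood steps
inductive pvReach (coords : List (List Int)) (c0 : List Int) : List Int → Prop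
  | start : pvReach coords c0 c0
  | step (c nb : List Int) : pvReach coords c0 c → nb ∈ pvNbrs c → nb ∈ coords →
      pvReach coords c0 nb

theorem pvA_visit_eq (coords : List (List Int)) (visited : PySem.Set (List Int))
    (stack : List (List Int)) (curr : List Int) :
    pvA_visit coords visited stack curr =
      (pvNbrs curr).foldl
        (fun st nb => if nb ∈ coords ∧ nb ∉ visited then nb :: st else st) stack := rfl

theorem pvB_expand_eq (cells : PySem.Set (List Int))
    (acc : PySem.Set (List Int) × List (List Int)) (cur : List Int) :
    pvB_expand cells acc cur =
      (pvNbrs cur).foldl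
        (fun a nb => if nb ∈ cells ∧ nb ∉ a.1 then (PySem.Set.add a.1 nb, a.2 ++ [nb]) else a)
        acc := rfl

theorem pvNbrs_length (curr : List Int) : (pvNbrs curr).length = 26 := rfl

-- strict decrease of a countP when one element flips from counted to not counted
theorem pv_countP_lt {α : Type} (U : List α) (p q : α → Bool)
    (hmono : ∀ x, q x = true → p x = true) (y : α) (hyU : y ∈ U)
    (hyp : p y = true) (hyq : q y = false) : U.countP q < U.countP p := by
  induction U with
  | nil => cases hyU
  | cons a t ih =>
    rcases List.mem_cons.mp hyU with rfl | hyt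
    · have hmono' : t.countP q ≤ t.countP p :=
        List.countP_mono_left (fun x _ hx => hmono x hx)
      simp [hyp, hyq]
      omega
    · have := ih hyt
      by_cases hqa : q a = true
      · have hpa := hmono a hqa
        simp [hpa, hqa]; omega
      · simp only [Bool.not_eq_true] at hqa
        by_cases hpa : p a = true
        · simp [hpa, hqa]; omega
        · simp only [Bool.not_eq_true] at hpa
          simp [hpa, hqa]; omega

-- ==== A-side loop facts ====

-- generic facts about the 'push if condition' fold
theorem pv_foldl_cons_mem {α : Type} (p : α → Prop) [DecidablePred p] (l s : List α) (y : α) :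
    y ∈ l.foldl (fun st nb => if p nb then nb :: st else st) s ↔ y ∈ s ∨ (y ∈ l ∧ p y) := by
  induction l generalizing s with
  | nil => simp
  | cons a t ih =>
    simp only [List.foldl_cons]
    by_cases hpa : p a
    · rw [if_pos hpa, ih]
      simp only [List.mem_cons]
      constructor
      · rintro ((rfl | hs) | ⟨ht, hp⟩)
        · exact Or.inr ⟨Or.inl rfl, hpa⟩
        · exact Or.inl hs
        · exact Or.inr ⟨Or.inr ht, hp⟩
      · rintro (hs | ⟨(rfl | ht), hp⟩)
        · exact Or.inl (Or.inr hs)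
        · exact Or.inl (Or.inl rfl)
        · exact Or.inr ⟨ht, hp⟩
    · rw [if_neg hpa, ih]
      simp only [List.mem_cons]
      constructor
      · rintro (hs | ⟨ht, hp⟩)
        · exact Or.inl hs
        · exact Or.inr ⟨Or.inr ht, hp⟩
      · rintro (hs | ⟨(rfl | ht), hp⟩)
        · exact Or.inl hs
        · exact absurd hp hpa
        · exact Or.inr ⟨ht, hp⟩

theorem pv_foldl_cons_len {α : Type} (p : α → Prop) [DecidablePred p] (l s : List α) :
    (l.foldl (fun st nb => if p nb then nb :: st else st) s).length ≤ s.length + l.length := by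
  induction l generalizing s with
  | nil => simp
  | cons a t ih =>
    simp only [List.foldl_cons, List.length_cons]
    by_cases hpa : p a
    · rw [if_pos hpa]
      have := ih (a :: s)
      simp only [List.length_cons] at this
      omega
    · rw [if_neg hpa]
      have := ih s
      omega

theorem pvA_push_mem (coords : List (List Int)) (visited : PySem.Set (List Int))
    (stack : List (List Int)) (curr : List Int) (s : List Int) :
    s ∈ pvA_visit coords visited stack curr ↔
      s ∈ stack ∨ (s ∈ pvNbrs curr ∧ s ∈ coords ∧ s ∉ visited) := by
  rw [pvA_visit_eq]
  exact pv_foldl_cons_mem (fun nb => nb ∈ coords ∧ nb ∉ visited) (pvNbrs curr) stack s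

theorem pvA_push_len (coords : List (List Int)) (visited : PySem.Set (List Int))
    (stack : List (List Int)) (curr : List Int) :
    (pvA_visit coords visited stack curr).length ≤ stack.length + 26 := by
  rw [pvA_visit_eq]
  have := pv_foldl_cons_len (fun nb => nb ∈ coords ∧ nb ∉ visited) (pvNbrs curr) stack
  rw [pvNbrs_length] at this
  exact this

-- master lemma for A's loop
theorem pvA_loop_spec (coords : List (List Int)) (c0 : List Int)
    (fuel : Nat) (visited : PySem.Set (List Int)) (stack : List (List Int))
    (hnd : visited.Nodup)
    (hvR : ∀ v ∈ visited, pvReach coords c0 v)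
    (hsR : ∀ s ∈ stack, pvReach coords c0 s)
    (hsU : ∀ s ∈ stack, s ∈ c0 :: coords)
    (hcl : ∀ v ∈ visited, ∀ nb ∈ pvNbrs v, nb ∈ coords → nb ∈ visited ∨ nb ∈ stack)
    (hfuel : 27 * (c0 :: coords).countP (fun c => decide (c ∉ visited)) + stack.length ≤ fuel) :
    (∀ v ∈ visited, v ∈ pvA_loop coords fuel visited stack) ∧
    (∀ s ∈ stack, s ∈ pvA_loop coords fuel visited stack) ∧
    (pvA_loop coords fuel visited stack).Nodup ∧
    (∀ v ∈ pvA_loop coords fuel visited stack, pvReach coords c0 v) ∧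
    (∀ v ∈ pvA_loop coords fuel visited stack, ∀ nb ∈ pvNbrs v, nb ∈ coords →
        nb ∈ pvA_loop coords fuel visited stack) := by
  induction fuel generalizing visited stack with
  | zero =>
    have hstack : stack = [] := by
      cases stack with
      | nil => rfl
      | cons a t => simp only [List.length_cons] at hfuel; omega
    subst hstack
    simp only [pvA_loop]
    refine ⟨fun v hv => hv, fun s hs => by simp at hs, hnd, hvR, ?_⟩
    intro v hv nb hnb hnbc
    rcases hcl v hv nb hnb hnbc with h | h
    · exact h
    · simp at h
  | succ f ih =>
    cases stack with
    | nil =>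
      simp only [pvA_loop]
      refine ⟨fun v hv => hv, fun s hs => by simp at hs, hnd, hvR, ?_⟩
      intro v hv nb hnb hnbc
      rcases hcl v hv nb hnb hnbc with h | h
      · exact h
      · simp at h
    | cons curr rest =>
      simp only [pvA_loop]
      by_cases hcv : curr ∈ visited
      · rw [if_pos hcv]
        have hcl' : ∀ v ∈ visited, ∀ nb ∈ pvNbrs v, nb ∈ coords → nb ∈ visited ∨ nb ∈ rest := by
          intro v hv nb hnb hnbc
          rcases hcl v hv nb hnb hnbc with h | h
          · exact Or.inl h
          · rcases List.mem_cons.mp h with rfl | h'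
            · exact Or.inl hcv
            · exact Or.inr h'
        have hfuel' : 27 * (c0 :: coords).countP (fun c => decide (c ∉ visited)) + rest.length ≤ f := by
          simp only [List.length_cons] at hfuel; omega
        obtain ⟨C1, C2, C3, C4, C5⟩ := ih visited rest hnd hvR
          (fun s hs => hsR s (List.mem_cons_of_mem _ hs))
          (fun s hs => hsU s (List.mem_cons_of_mem _ hs)) hcl' hfuel'
        refine ⟨C1, ?_, C3, C4, C5⟩
        intro s hs
        rcases List.mem_cons.mp hs with rfl | hs'
        · exact C1 s hcv
        · exact C2 s hs'
      · rw [if_neg hcv]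
        have hcurrR : pvReach coords c0 curr := hsR curr (by simp)
        have hnd' : (PySem.Set.add visited curr).Nodup := PySem.Set.nodup_add visited curr hnd
        have hvR' : ∀ v ∈ PySem.Set.add visited curr, pvReach coords c0 v := by
          intro v hv
          rcases (PySem.Set.mem_add visited curr v).mp hv with h | rfl
          · exact hvR v h
          · exact hcurrR
        have hstack' := pvA_push_mem coords (PySem.Set.add visited curr) rest curr
        have hsR' : ∀ s ∈ pvA_visit coords (PySem.Set.add visited curr) rest curr,
            pvReach coords c0 s := by
          intro s hs
          rcases (hstack' s).mp hs with h | ⟨hnb, hnbc, _⟩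
          · exact hsR s (List.mem_cons_of_mem _ h)
          · exact pvReach.step curr s hcurrR hnb hnbc
        have hsU' : ∀ s ∈ pvA_visit coords (PySem.Set.add visited curr) rest curr,
            s ∈ c0 :: coords := by
          intro s hs
          rcases (hstack' s).mp hs with h | ⟨_, hnbc, _⟩
          · exact hsU s (List.mem_cons_of_mem _ h)
          · exact List.mem_cons_of_mem _ hnbc
        have hcl'' : ∀ v ∈ PySem.Set.add visited curr, ∀ nb ∈ pvNbrs v, nb ∈ coords →
            nb ∈ PySem.Set.add visited curr ∨
              nb ∈ pvA_visit coords (PySem.Set.add visited curr) rest curr := by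
          intro v hv nb hnb hnbc
          by_cases hnv : nb ∈ PySem.Set.add visited curr
          · exact Or.inl hnv
          · rcases (PySem.Set.mem_add visited curr v).mp hv with hvv | rfl
            · rcases hcl v hvv nb hnb hnbc with h | h
              · exact Or.inl ((PySem.Set.mem_add visited curr nb).mpr (Or.inl h))
              · rcases List.mem_cons.mp h with rfl | h'
                · exact absurd ((PySem.Set.mem_add visited nb nb).mpr (Or.inr rfl)) hnv
                · exact Or.inr ((hstack' nb).mpr (Or.inl h'))
            · exact Or.inr ((hstack' nb).mpr (Or.inr ⟨hnb, hnbc, hnv⟩))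
        have hcnt : (c0 :: coords).countP (fun c => decide (c ∉ PySem.Set.add visited curr)) <
            (c0 :: coords).countP (fun c => decide (c ∉ visited)) := by
          refine pv_countP_lt (c0 :: coords) _ _ ?_ curr (hsU curr (by simp)) ?_ ?_
          · intro x hx
            simp only [decide_eq_true_eq] at hx ⊢
            exact fun hxv => hx ((PySem.Set.mem_add visited curr x).mpr (Or.inl hxv))
          · simp [hcv]
          · simp [(PySem.Set.mem_add visited curr curr).mpr (Or.inr rfl)]
        have hlen := pvA_push_len coords (PySem.Set.add visited curr) rest curr
        have hfuel' : 27 * (c0 :: coords).countP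
              (fun c => decide (c ∉ PySem.Set.add visited curr)) +
            (pvA_visit coords (PySem.Set.add visited curr) rest curr).length ≤ f := by
          simp only [List.length_cons] at hfuel; omega
        obtain ⟨C1, C2, C3, C4, C5⟩ := ih (PySem.Set.add visited curr)
          (pvA_visit coords (PySem.Set.add visited curr) rest curr) hnd' hvR' hsR' hsU' hcl'' hfuel'
        refine ⟨?_, ?_, C3, C4, C5⟩
        · intro v hv
          exact C1 v ((PySem.Set.mem_add visited curr v).mpr (Or.inl hv))
        · intro s hs
          rcases List.mem_cons.mp hs with rfl | hs'
          · exact C1 s ((PySem.Set.mem_add visited s s).mpr (Or.inr rfl))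
          · exact C2 s ((hstack' s).mpr (Or.inl hs'))

-- ==== B-side loop facts ====

-- generic facts about B's 'add fresh in-set elements' fold over one neighbour list
theorem pv_gstep (cells : PySem.Set (List Int)) (l : List (List Int)) :
    ∀ (a : PySem.Set (List Int) × List (List Int)), a.1.Nodup →
    (∀ y ∈ a.1, y ∈ (l.foldl (fun a nb => if nb ∈ cells ∧ nb ∉ a.1 then
        (PySem.Set.add a.1 nb, a.2 ++ [nb]) else a) a).1) ∧
    (∀ y, y ∈ (l.foldl (fun a nb => if nb ∈ cells ∧ nb ∉ a.1 then
        (PySem.Set.add a.1 nb, a.2 ++ [nb]) else a) a).1 ↔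
        y ∈ a.1 ∨ (y ∈ l ∧ y ∈ cells)) ∧
    (∀ y, y ∈ (l.foldl (fun a nb => if nb ∈ cells ∧ nb ∉ a.1 then
        (PySem.Set.add a.1 nb, a.2 ++ [nb]) else a) a).2 ↔
        y ∈ a.2 ∨ (y ∉ a.1 ∧ y ∈ (l.foldl (fun a nb => if nb ∈ cells ∧ nb ∉ a.1 then
          (PySem.Set.add a.1 nb, a.2 ++ [nb]) else a) a).1)) ∧
    (l.foldl (fun a nb => if nb ∈ cells ∧ nb ∉ a.1 then
        (PySem.Set.add a.1 nb, a.2 ++ [nb]) else a) a).1.Nodup := by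
  induction l with
  | nil =>
    intro a hnd
    simp only [List.foldl_nil]
    refine ⟨fun y hy => hy, fun y => by tauto, ?_, hnd⟩
    intro y
    constructor
    · exact fun hy => Or.inl hy
    · rintro (hy | ⟨hnv, hv⟩)
      · exact hy
      · exact absurd hv hnv
  | cons b t ih =>
    intro a hnd
    simp only [List.foldl_cons]
    by_cases hb : b ∈ cells ∧ b ∉ a.1
    · rw [if_pos hb]
      obtain ⟨I1, I2, I3, I4⟩ := ih (PySem.Set.add a.1 b, a.2 ++ [b])
        (PySem.Set.nodup_add a.1 b hnd)
      have hbr : b ∈ (t.foldl (fun a nb => if nb ∈ cells ∧ nb ∉ a.1 then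
          (PySem.Set.add a.1 nb, a.2 ++ [nb]) else a) (PySem.Set.add a.1 b, a.2 ++ [b])).1 :=
        I1 b ((PySem.Set.mem_add a.1 b b).mpr (Or.inr rfl))
      refine ⟨?_, ?_, ?_, I4⟩
      · intro y hy
        exact I1 y ((PySem.Set.mem_add a.1 b y).mpr (Or.inl hy))
      · intro y
        rw [I2 y]
        rw [show (((PySem.Set.add a.1 b, a.2 ++ [b]) :
              PySem.Set (List Int) × List (List Int))).1 = PySem.Set.add a.1 b from rfl]
        rw [PySem.Set.mem_add a.1 b y]
        simp only [List.mem_cons]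
        constructor
        · rintro ((h | rfl) | ⟨ht, hc⟩)
          · exact Or.inl h
          · exact Or.inr ⟨Or.inl rfl, hb.1⟩
          · exact Or.inr ⟨Or.inr ht, hc⟩
        · rintro (h | ⟨(rfl | ht), hc⟩)
          · exact Or.inl (Or.inl h)
          · exact Or.inl (Or.inr rfl)
          · exact Or.inr ⟨ht, hc⟩
      · intro y
        rw [I3 y]
        rw [show (((PySem.Set.add a.1 b, a.2 ++ [b]) :
              PySem.Set (List Int) × List (List Int))).2 = a.2 ++ [b] from rfl]
        rw [show (((PySem.Set.add a.1 b, a.2 ++ [b]) :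
              PySem.Set (List Int) × List (List Int))).1 = PySem.Set.add a.1 b from rfl]
        simp only [List.mem_append, List.mem_singleton]
        constructor
        · rintro ((h | rfl) | ⟨hna, hr⟩)
          · exact Or.inl h
          · exact Or.inr ⟨hb.2, hbr⟩
          · refine Or.inr ⟨fun h1 => hna ((PySem.Set.mem_add a.1 b y).mpr (Or.inl h1)), hr⟩
        · rintro (h | ⟨hna, hr⟩)
          · exact Or.inl (Or.inl h)
          · by_cases hyb : y = b
            · exact Or.inl (Or.inr hyb)
            · refine Or.inr ⟨fun hm => ?_, hr⟩
              rcases (PySem.Set.mem_add a.1 b y).mp hm with h1 | h1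
              · exact hna h1
              · exact hyb h1
    · rw [if_neg hb]
      obtain ⟨I1, I2, I3, I4⟩ := ih a hnd
      refine ⟨I1, ?_, I3, I4⟩
      intro y
      rw [I2 y]
      simp only [List.mem_cons]
      constructor
      · rintro (h | ⟨ht, hc⟩)
        · exact Or.inl h
        · exact Or.inr ⟨Or.inr ht, hc⟩
      · rintro (h | ⟨(rfl | ht), hc⟩)
        · exact Or.inl h
        · exact Or.inl (Classical.byContradiction fun hna => hb ⟨hc, hna⟩)
        · exact Or.inr ⟨ht, hc⟩

theorem pvB_fold_spec (cells : PySem.Set (List Int)) (frontier : List (List Int))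
    (v : PySem.Set (List Int)) (w : List (List Int)) (hnd : v.Nodup) :
    (∀ y ∈ v, y ∈ (frontier.foldl (pvB_expand cells) (v, w)).1) ∧
    (∀ y, y ∈ (frontier.foldl (pvB_expand cells) (v, w)).1 ↔
        y ∈ v ∨ (∃ c ∈ frontier, y ∈ pvNbrs c ∧ y ∈ cells)) ∧
    (∀ y, y ∈ (frontier.foldl (pvB_expand cells) (v, w)).2 ↔
        y ∈ w ∨ (y ∉ v ∧ y ∈ (frontier.foldl (pvB_expand cells) (v, w)).1)) ∧
    (frontier.foldl (pvB_expand cells) (v, w)).1.Nodup := by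
  induction frontier generalizing v w with
  | nil =>
    simp only [List.foldl_nil]
    refine ⟨fun y hy => hy, fun y => by simp, ?_, hnd⟩
    intro y
    constructor
    · exact fun hy => Or.inl hy
    · rintro (hy | ⟨hnv, hv⟩)
      · exact hy
      · exact absurd hv hnv
  | cons c t ih =>
    simp only [List.foldl_cons]
    rcases hEe : pvB_expand cells (v, w) c with ⟨v1, w1⟩
    have hG := pv_gstep cells (pvNbrs c) (v, w) hnd
    rw [← pvB_expand_eq, hEe] at hG
    obtain ⟨E1, E2, E3, E4⟩ := hG
    obtain ⟨I1, I2, I3, I4⟩ := ih v1 w1 E4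
    refine ⟨?_, ?_, ?_, I4⟩
    · intro y hy
      exact I1 y (E1 y hy)
    · intro y
      rw [I2 y]
      constructor
      · rintro (h1 | ⟨c', hc', hy⟩)
        · rcases (E2 y).mp h1 with h | ⟨hn, hc⟩
          · exact Or.inl h
          · exact Or.inr ⟨c, by simp, hn, hc⟩
        · exact Or.inr ⟨c', List.mem_cons_of_mem _ hc', hy⟩
      · rintro (h | ⟨c', hc', hy⟩)
        · exact Or.inl ((E2 y).mpr (Or.inl h))
        · rcases List.mem_cons.mp hc' with rfl | hc''
          · exact Or.inl ((E2 y).mpr (Or.inr hy))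
          · exact Or.inr ⟨c', hc'', hy⟩
    · intro y
      rw [I3 y]
      constructor
      · rintro (h1 | ⟨hn1, hr⟩)
        · rcases (E3 y).mp h1 with h | ⟨hnv, hv1⟩
          · exact Or.inl h
          · exact Or.inr ⟨hnv, I1 y hv1⟩
        · exact Or.inr ⟨fun hv => hn1 (E1 y hv), hr⟩
      · rintro (h | ⟨hnv, hr⟩)
        · exact Or.inl ((E3 y).mpr (Or.inl h))
        · by_cases hv1 : y ∈ v1
          · exact Or.inl ((E3 y).mpr (Or.inr ⟨hnv, hv1⟩))
          · exact Or.inr ⟨hv1, hr⟩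

-- master lemma for B's loop
theorem pvB_loop_spec (coords : List (List Int)) (c0 : List Int)
    (fuel : Nat) (visited : PySem.Set (List Int)) (frontier : List (List Int))
    (hnd : visited.Nodup)
    (hvR : ∀ v ∈ visited, pvReach coords c0 v)
    (hfv : ∀ s ∈ frontier, s ∈ visited)
    (hcl : ∀ v ∈ visited, v ∈ frontier ∨ (∀ nb ∈ pvNbrs v, nb ∈ coords → nb ∈ visited))
    (hfuel : (c0 :: coords).countP (fun c => decide (c ∉ visited)) +
        (if frontier = [] then 0 else 1) ≤ fuel) :
    (∀ v ∈ visited, v ∈ pvB_loop (PySem.Set.ofList coords) fuel visited frontier) ∧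
    (pvB_loop (PySem.Set.ofList coords) fuel visited frontier).Nodup ∧
    (∀ v ∈ pvB_loop (PySem.Set.ofList coords) fuel visited frontier, pvReach coords c0 v) ∧
    (∀ v ∈ pvB_loop (PySem.Set.ofList coords) fuel visited frontier, ∀ nb ∈ pvNbrs v,
        nb ∈ coords → nb ∈ pvB_loop (PySem.Set.ofList coords) fuel visited frontier) := by
  induction fuel generalizing visited frontier with
  | zero =>
    have hf : frontier = [] := by
      cases frontier with
      | nil => rfl
      | cons a t =>
        exfalso
        rw [if_neg (by simp)] at hfuel
        omega
    subst hf
    simp only [pvB_loop]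
    refine ⟨fun v hv => hv, hnd, hvR, ?_⟩
    intro v hv nb hnb hnbc
    rcases hcl v hv with h | h
    · simp at h
    · exact h nb hnb hnbc
  | succ f ih =>
    cases frontier with
    | nil =>
      simp only [pvB_loop]
      refine ⟨fun v hv => hv, hnd, hvR, ?_⟩
      intro v hv nb hnb hnbc
      rcases hcl v hv with h | h
      · simp at h
      · exact h nb hnb hnbc
    | cons c t =>
      simp only [pvB_loop]
      obtain ⟨F1, F2, F3, F4⟩ := pvB_fold_spec (PySem.Set.ofList coords) (c :: t) visited [] hnd
      have hvR' : ∀ v ∈ ((c :: t).foldl (pvB_expand (PySem.Set.ofList coords)) (visited, [])).1,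
          pvReach coords c0 v := by
        intro y hy
        rcases (F2 y).mp hy with h | ⟨c', hc', hn, hcel⟩
        · exact hvR y h
        · exact pvReach.step c' y (hvR c' (hfv c' hc')) hn
            ((PySem.Set.mem_ofList coords y).mp hcel)
      have hfv' : ∀ s ∈ ((c :: t).foldl (pvB_expand (PySem.Set.ofList coords)) (visited, [])).2,
          s ∈ ((c :: t).foldl (pvB_expand (PySem.Set.ofList coords)) (visited, [])).1 := by
        intro s hs
        rcases (F3 s).mp hs with h | ⟨_, h2⟩
        · simp at h
        · exact h2
      have hcl' : ∀ v ∈ ((c :: t).foldl (pvB_expand (PySem.Set.ofList coords)) (visited, [])).1,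
          v ∈ ((c :: t).foldl (pvB_expand (PySem.Set.ofList coords)) (visited, [])).2 ∨
          (∀ nb ∈ pvNbrs v, nb ∈ coords →
            nb ∈ ((c :: t).foldl (pvB_expand (PySem.Set.ofList coords)) (visited, [])).1) := by
        intro v hv
        by_cases hv2 : v ∈ ((c :: t).foldl (pvB_expand (PySem.Set.ofList coords)) (visited, [])).2
        · exact Or.inl hv2
        · right
          have hvv : v ∈ visited := by
            by_contra hnv
            exact hv2 ((F3 v).mpr (Or.inr ⟨hnv, hv⟩))
          intro nb hnb hnbc
          rcases hcl v hvv with hmem | hclosed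
          · exact (F2 nb).mpr (Or.inr ⟨v, hmem, hnb, (PySem.Set.mem_ofList coords nb).mpr hnbc⟩)
          · exact F1 nb (hclosed nb hnb hnbc)
      have hmono : (c0 :: coords).countP (fun x => decide
            (x ∉ ((c :: t).foldl (pvB_expand (PySem.Set.ofList coords)) (visited, [])).1)) ≤
          (c0 :: coords).countP (fun x => decide (x ∉ visited)) :=
        List.countP_mono_left (fun x _ hx => by
          simp only [decide_eq_true_eq] at hx ⊢
          exact fun hv => hx (F1 x hv))
      have hfuel1 : (c0 :: coords).countP (fun x => decide (x ∉ visited)) + 1 ≤ f + 1 := by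
        rw [if_neg (by simp)] at hfuel
        exact hfuel
      have hfuel' : (c0 :: coords).countP (fun x => decide
            (x ∉ ((c :: t).foldl (pvB_expand (PySem.Set.ofList coords)) (visited, [])).1)) +
          (if ((c :: t).foldl (pvB_expand (PySem.Set.ofList coords)) (visited, [])).2 = []
            then 0 else 1) ≤ f := by
        rcases hR2 : ((c :: t).foldl (pvB_expand (PySem.Set.ofList coords)) (visited, [])).2 with
          _ | ⟨y, ys⟩
        · rw [if_pos rfl]
          omega
        · rw [if_neg (by simp)]
          have hy : y ∈ ((c :: t).foldl (pvB_expand (PySem.Set.ofList coords)) (visited, [])).2 := by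
            rw [hR2]; simp
          rcases (F3 y).mp hy with h | ⟨hnv, hyR⟩
          · simp at h
          · have hyU : y ∈ c0 :: coords := by
              rcases (F2 y).mp hyR with h | ⟨c', _, _, hcel⟩
              · exact absurd h hnv
              · exact List.mem_cons_of_mem _ ((PySem.Set.mem_ofList coords y).mp hcel)
            have hlt := pv_countP_lt (c0 :: coords)
              (fun x => decide (x ∉ visited))
              (fun x => decide
                (x ∉ ((c :: t).foldl (pvB_expand (PySem.Set.ofList coords)) (visited, [])).1))
              (fun x hx => by
                simp only [decide_eq_true_eq] at hx ⊢
                exact fun hv => hx (F1 x hv)) y hyU (by simp [hnv])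
              (by simp only [decide_eq_false_iff_not, not_not]; exact hyR)
            omega
      obtain ⟨C1, C2, C3, C4⟩ := ih
        ((c :: t).foldl (pvB_expand (PySem.Set.ofList coords)) (visited, [])).1
        ((c :: t).foldl (pvB_expand (PySem.Set.ofList coords)) (visited, [])).2
        F4 hvR' hfv' hcl' hfuel'
      exact ⟨fun v hv => C1 v (F1 v hv), C2, C3, C4⟩

-- both final visited sets have the same members (= the reachable cells) and are Nodup,
-- hence the same length
theorem pv_final_len (coords : List (List Int)) (c0 : List Int) (rest : List (List Int))
    (hc : coords = c0 :: rest) :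
    (pvA_loop coords (27 * (coords.length + 1) + 1) PySem.Set.empty [c0]).length =
    (pvB_loop (PySem.Set.ofList coords) (coords.length + 2)
        (PySem.Set.add PySem.Set.empty c0) [c0]).length := by
  subst hc
  obtain ⟨A1, A2, A3, A4, A5⟩ := pvA_loop_spec (c0 :: rest) c0
    (27 * ((c0 :: rest).length + 1) + 1) PySem.Set.empty [c0]
    (by simp [PySem.Set.empty])
    (by intro v hv; simp [PySem.Set.empty] at hv)
    (by intro s hs; simp at hs; subst hs; exact pvReach.start)
    (by intro s hs; simp at hs; subst hs; simp)
    (by intro v hv; simp [PySem.Set.empty] at hv)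
    (by simp [PySem.Set.empty, List.length_cons])
  obtain ⟨B1, B2, B3, B4⟩ := pvB_loop_spec (c0 :: rest) c0
    ((c0 :: rest).length + 2) (PySem.Set.add PySem.Set.empty c0) [c0]
    (PySem.Set.nodup_add PySem.Set.empty c0 (by simp [PySem.Set.empty]))
    (by
      intro v hv
      rcases (PySem.Set.mem_add PySem.Set.empty c0 v).mp hv with h | rfl
      · simp [PySem.Set.empty] at h
      · exact pvReach.start)
    (by
      intro s hs; simp at hs; subst hs
      exact (PySem.Set.mem_add PySem.Set.empty s s).mpr (Or.inr rfl))
    (by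
      intro v hv
      rcases (PySem.Set.mem_add PySem.Set.empty c0 v).mp hv with h | rfl
      · simp [PySem.Set.empty] at h
      · exact Or.inl (by simp))
    (by
      rw [if_neg (by simp)]
      have := List.countP_le_length (l := c0 :: c0 :: rest)
        (p := fun x => decide (x ∉ PySem.Set.add PySem.Set.empty c0))
      simp only [List.length_cons] at this ⊢
      omega)
  have hmem : ∀ x,
      x ∈ pvA_loop (c0 :: rest) (27 * ((c0 :: rest).length + 1) + 1) PySem.Set.empty [c0] ↔
      x ∈ pvB_loop (PySem.Set.ofList (c0 :: rest)) ((c0 :: rest).length + 2)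
        (PySem.Set.add PySem.Set.empty c0) [c0] := by
    intro x
    constructor
    · intro hx
      have hr := A4 x hx
      clear hx
      induction hr with
      | start => exact B1 c0 ((PySem.Set.mem_add PySem.Set.empty c0 c0).mpr (Or.inr rfl))
      | step c nb hrc hnb hnbc ih2 => exact B4 c ih2 nb hnb hnbc
    · intro hx
      have hr := B3 x hx
      clear hx
      induction hr with
      | start => exact A2 c0 (by simp)
      | step c nb hrc hnb hnbc ih2 => exact A5 c ih2 nb hnb hnbc
  exact List.Perm.length_eq ((List.perm_ext_iff_of_nodup A3 B2).mpr hmem)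

-- ===== VERDICT (by name: the statement is the Claim_ definition above) =====
theorem is_connected_vertex_spec : Claim_equal_is_connected_vertex := by
  intro coords _ _
  unfold Spec_is_connected_vertex
  match h : coords with
  | [] => rfl
  | c0 :: rest =>
    simp only [is_connected_vertex, is_connected_vertex_alt]
    rw [pv_final_len (c0 :: rest) c0 rest rfl]
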